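-- pv_equiv track=rewrite | github.com/yifongau/advent-of-code | 2024/02-problemdampener.py | problem_dampener
-- ===== SOURCE A (Python) =====
-- def is_safe(line):
--
--     if line[0] == line[1]:
--         return 0
--
--     elif line[0] > line[1]:
--         for n in range(len(line)-1):
--             if line[n] > line[n+1]:
--                 if 0 < line[n] - line[n+1] < 4:
--                     continue
--                 else: return 0
--             else: return 0
--         return 1
--
--     elif line[0] < line[1]:
--         for n in range(len(line)-1):
--             if line[n] < line[n+1]:
--                 if 0 < line[n+1] - line[n] < 4:
--                     continue
--                 else: return 0
--             else: return 0
--         return 1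
--
-- def problem_dampener(line):
--     if is_safe(line) == 1:
--         return 1
--     else:
--         for n in range(len(line)):
--             new_line = list(line)
--             new_line.pop(n)
--             if is_safe(new_line) == 1:
--                 return 1
--             else: continue
--     return 0
-- ===== SOURCE B (Python) =====
-- def problem_dampener(line):
--     # O(n): one scan per direction; on the first bad adjacent pair, only the
--     # two removals that break that pair can help, so try exactly those.
--     def ok(xs, sign):
--         return all(1 <= sign * (xs[i + 1] - xs[i]) <= 3 for i in range(len(xs) - 1))
--
--     def drop(xs, i):
--         return xs[:i] + xs[i + 1:]
--
--     for sign in (1, -1):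
--         if ok(line, sign):
--             return 1
--         f = next(i for i in range(len(line) - 1)
--                  if not (1 <= sign * (line[i + 1] - line[i]) <= 3))
--         if ok(drop(line, f), sign) or ok(drop(line, f + 1), sign):
--             return 1
--     return 0
-- ===== Notes on version B (the rewrite author's own statement) =====
-- stated objective: faster
-- what changed: Instead of retrying the full safety scan after removing every index (O(n^2)), B scans once per direction to the first bad adjacent pair and tries only the two removals that can break that pair, which is O(n).
import Mathlib
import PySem

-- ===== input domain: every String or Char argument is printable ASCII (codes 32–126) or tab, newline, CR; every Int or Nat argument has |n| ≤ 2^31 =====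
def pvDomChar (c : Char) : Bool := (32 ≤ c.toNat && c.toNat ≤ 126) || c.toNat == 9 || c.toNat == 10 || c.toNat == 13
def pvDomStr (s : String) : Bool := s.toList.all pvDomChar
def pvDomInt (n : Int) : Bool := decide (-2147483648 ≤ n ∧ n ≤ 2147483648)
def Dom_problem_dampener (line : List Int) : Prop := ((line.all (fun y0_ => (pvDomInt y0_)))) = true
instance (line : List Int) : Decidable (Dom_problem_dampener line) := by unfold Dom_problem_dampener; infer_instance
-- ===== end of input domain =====

-- B replaces A's quadratic try-every-removal loop by one scan per direction to the
-- first bad adjacent pair plus the only two removals that can break that pair (O(n)).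


-- ===== PORT A =====
-- the 'line[0] > line[1]' branch: one step per loop iteration n (reads line[n], line[n+1])
def pvDecScan : List Int → Int
  | a :: b :: rest =>
      if a > b then (if 0 < a - b ∧ a - b < 4 then pvDecScan (b :: rest) else 0) else 0
  | _ => 1
-- the 'line[0] < line[1]' branch
def pvIncScan : List Int → Int
  | a :: b :: rest =>
      if a < b then (if 0 < b - a ∧ b - a < 4 then pvIncScan (b :: rest) else 0) else 0
  | _ => 1
-- is_safe; none = IndexError reading line[0]/line[1] (list shorter than 2)
def pvIsSafe (line : List Int) : Option Int :=
  match line with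
  | a :: b :: rest => some (if a = b then 0 else if a > b then pvDecScan (a :: b :: rest) else pvIncScan (a :: b :: rest))
  | _ => none

-- the 'for n in range(len(line))' loop; new_line.pop(n) is PySem.List.pop?
-- (pop? never fails here since n < len; a 'none' from pvIsSafe is a Python raise,
-- excluded by Pre_, where this port just continues)
def pvDampLoop (line : List Int) : List Nat → Int
  | [] => 0
  | n :: ns =>
      match PySem.List.pop? line (n : Int) with
      | some (_, rest) => if pvIsSafe rest = some 1 then 1 else pvDampLoop line ns
      | none => 0

def problem_dampener (line : List Int) : Int :=
  if pvIsSafe line = some 1 then 1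
  else pvDampLoop line (List.range line.length)

-- ===== PORT B =====
-- ok(xs, sign): every adjacent pair satisfies 1 <= sign*(b-a) <= 3
def pvOk (sign : Int) : List Int → Bool
  | a :: b :: rest => decide (1 ≤ sign * (b - a) ∧ sign * (b - a) ≤ 3) && pvOk sign (b :: rest)
  | _ => true

-- index of the first bad adjacent pair (the 'next(...)' generator), i = running index
def pvFirstBad (sign : Int) : List Int → Nat → Option Nat
  | a :: b :: rest, i =>
      if 1 ≤ sign * (b - a) ∧ sign * (b - a) ≤ 3 then pvFirstBad sign (b :: rest) (i + 1)
      else some i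
  | _, _ => none

-- drop(xs, i) = xs[:i] + xs[i+1:]
def pvDrop (xs : List Int) (i : Nat) : List Int :=
  PySem.List.slice xs none (some (i : Int)) ++ PySem.List.slice xs (some ((i : Int) + 1)) none

def pvTryDir (line : List Int) (sign : Int) : Bool :=
  if pvOk sign line then true
  else
    match pvFirstBad sign line 0 with
    | some f => pvOk sign (pvDrop line f) || pvOk sign (pvDrop line (f + 1))
    | none => false   -- unreachable: ok failed, so a bad pair exists

def problem_dampener_alt (line : List Int) : Int :=
  if pvTryDir line 1 || pvTryDir line (-1) then 1 else 0

-- ===== PRECONDITION & SPEC =====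
-- true iff line is exactly two elements forming one safe step (then A returns 1 without removals)
def pvGoodTwo (line : List Int) : Bool :=
  match line with
  | [a, b] => decide ((1 ≤ b - a ∧ b - a ≤ 3) ∨ (1 ≤ a - b ∧ a - b ≤ 3))
  | _ => false

-- A raises IndexError on lists of length < 2 and on unsafe 2-element lists
-- (the removal loop calls is_safe on a 1-element list); exactly those are excluded.
def Pre_problem_dampener (line : List Int) : Prop :=
  3 ≤ line.length ∨ pvGoodTwo line = true
instance (line : List Int) : Decidable (Pre_problem_dampener line) := by
  unfold Pre_problem_dampener; infer_instance

def pvWitness_problem_dampener : List Int := [1, 2, 4]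

def Spec_problem_dampener (line : List Int) (out : Int) : Prop := out = problem_dampener_alt line
instance (line : List Int) (out : Int) : Decidable (Spec_problem_dampener line out) := by
  unfold Spec_problem_dampener; infer_instance

-- ===== CLAIM (what is proved, stated in full; the proofs are below) =====
def Claim_equal_problem_dampener : Prop :=
  ∀ (line : List Int), Dom_problem_dampener line → Pre_problem_dampener line →
    Spec_problem_dampener line (problem_dampener line)

-- ===== LEMMAS AND PROOFS =====


-- ---- B-side scan facts ----
lemma pvOk_tail (s a : Int) (ys : List Int) (h : pvOk s (a :: ys) = true) : pvOk s ys = true := by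
  cases ys with
  | nil => rfl
  | cons b rest => simp only [pvOk, Bool.and_eq_true] at h; exact h.2

lemma pvDecScan_iff : ∀ xs : List Int, pvDecScan xs = 1 ↔ pvOk (-1) xs = true := by
  intro xs
  induction xs with
  | nil => simp [pvDecScan, pvOk]
  | cons a t ih =>
    cases t with
    | nil => simp [pvDecScan, pvOk]
    | cons b rest =>
      simp only [pvDecScan, pvOk, Bool.and_eq_true, decide_eq_true_eq]
      split_ifs with h1 h2
      · constructor
        · intro hh; exact ⟨⟨by omega, by omega⟩, ih.mp hh⟩
        · rintro ⟨_, hh⟩; exact ih.mpr hh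
      · constructor
        · intro hh; omega
        · rintro ⟨hh, _⟩; omega
      · constructor
        · intro hh; omega
        · rintro ⟨hh, _⟩; omega

lemma pvIncScan_iff : ∀ xs : List Int, pvIncScan xs = 1 ↔ pvOk 1 xs = true := by
  intro xs
  induction xs with
  | nil => simp [pvIncScan, pvOk]
  | cons a t ih =>
    cases t with
    | nil => simp [pvIncScan, pvOk]
    | cons b rest =>
      simp only [pvIncScan, pvOk, Bool.and_eq_true, decide_eq_true_eq]
      split_ifs with h1 h2
      · constructor
        · intro hh; exact ⟨⟨by omega, by omega⟩, ih.mp hh⟩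
        · rintro ⟨_, hh⟩; exact ih.mpr hh
      · constructor
        · intro hh; omega
        · rintro ⟨hh, _⟩; omega
      · constructor
        · intro hh; omega
        · rintro ⟨hh, _⟩; omega

lemma pvIsSafe_pair_iff (a b : Int) (rest : List Int) :
    pvIsSafe (a :: b :: rest) = some 1 ↔
      (pvOk 1 (a :: b :: rest) = true ∨ pvOk (-1) (a :: b :: rest) = true) := by
  simp only [pvIsSafe, Option.some.injEq]
  split_ifs with h1 h2
  · subst h1
    simp only [pvOk, Bool.and_eq_true, decide_eq_true_eq]
    constructor
    · intro hh; omega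
    · rintro (⟨⟨hh, _⟩, _⟩ | ⟨⟨hh, _⟩, _⟩) <;> omega
  · rw [pvDecScan_iff]
    constructor
    · exact Or.inr
    · rintro (hh | hh)
      · exfalso
        simp only [pvOk, Bool.and_eq_true, decide_eq_true_eq] at hh
        omega
      · exact hh
  · rw [pvIncScan_iff]
    constructor
    · exact Or.inl
    · rintro (hh | hh)
      · exact hh
      · exfalso
        simp only [pvOk, Bool.and_eq_true, decide_eq_true_eq] at hh
        omega

lemma exists_cons2 (xs : List Int) (h : 2 ≤ xs.length) :
    ∃ a b rest, xs = a :: b :: rest := by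
  cases xs with
  | nil => simp at h
  | cons a t =>
    cases t with
    | nil => simp at h
    | cons b rest => exact ⟨a, b, rest, rfl⟩

lemma pvIsSafe_iff (xs : List Int) (h : 2 ≤ xs.length) :
    pvIsSafe xs = some 1 ↔ (pvOk 1 xs = true ∨ pvOk (-1) xs = true) := by
  obtain ⟨a, b, rest, rfl⟩ := exists_cons2 xs h
  exact pvIsSafe_pair_iff a b rest

-- ---- first-bad-pair facts ----
lemma pvFirstBad_none (s : Int) : ∀ (xs : List Int) (i : Nat),
    pvFirstBad s xs i = none → pvOk s xs = true := by
  intro xs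
  induction xs with
  | nil => intro i _; rfl
  | cons a t ih =>
    intro i h
    cases t with
    | nil => rfl
    | cons b rest =>
      simp only [pvFirstBad] at h
      split_ifs at h with hc
      · simp only [pvOk, Bool.and_eq_true, decide_eq_true_eq]
        exact ⟨hc, ih (i + 1) h⟩

lemma pvFirstBad_some_notOk (s : Int) : ∀ (xs : List Int) (i f : Nat),
    pvFirstBad s xs i = some f → pvOk s xs = false := by
  intro xs
  induction xs with
  | nil => intro i f h; simp [pvFirstBad] at h
  | cons a t ih =>
    intro i f h
    cases t with
    | nil => simp [pvFirstBad] at h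
    | cons b rest =>
      simp only [pvFirstBad] at h
      simp only [pvOk, Bool.and_eq_false_iff]
      split_ifs at h with hc
      · exact Or.inr (ih (i + 1) f h)
      · exact Or.inl (by simpa using hc)

lemma pvFirstBad_lt (s : Int) : ∀ (xs : List Int) (i f : Nat),
    pvFirstBad s xs i = some f → i ≤ f ∧ f - i + 1 < xs.length := by
  intro xs
  induction xs with
  | nil => intro i f h; simp [pvFirstBad] at h
  | cons a t ih =>
    intro i f h
    cases t with
    | nil => simp [pvFirstBad] at h
    | cons b rest =>
      simp only [pvFirstBad] at h
      split_ifs at h with hc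
      · have := ih (i + 1) f h
        simp only [List.length_cons] at this ⊢
        omega
      · simp only [Option.some.injEq] at h
        subst h
        simp only [List.length_cons]
        omega

lemma pvFirstBad_shift (s : Int) : ∀ (xs : List Int) (i : Nat),
    pvFirstBad s xs (i + 1) = (pvFirstBad s xs i).map (· + 1) := by
  intro xs
  induction xs with
  | nil => intro i; rfl
  | cons a t ih =>
    intro i
    cases t with
    | nil => rfl
    | cons b rest =>
      simp only [pvFirstBad]
      split_ifs with hc
      · exact ih (i + 1)
      · rfl


-- only a removal that breaks the FIRST bad pair can make the scan pass
lemma pvKey (s : Int) : ∀ (xs : List Int) (f j : Nat),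
    pvFirstBad s xs 0 = some f → pvOk s (xs.eraseIdx j) = true → j = f ∨ j = f + 1 := by
  intro xs
  induction xs with
  | nil => intro f j h; simp [pvFirstBad] at h
  | cons a t ih =>
    intro f j h hok
    cases t with
    | nil => simp [pvFirstBad] at h
    | cons b rest =>
      simp only [pvFirstBad] at h
      split_ifs at h with hc
      · -- first pair good: first bad pair lies in b :: rest, shifted by one
        rw [pvFirstBad_shift] at h
        obtain ⟨f', hf', rfl⟩ : ∃ f', pvFirstBad s (b :: rest) 0 = some f' ∧ f = f' + 1 := by
          cases hfb : pvFirstBad s (b :: rest) 0 with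
          | none => rw [hfb] at h; simp at h
          | some g => rw [hfb] at h; simp at h; exact ⟨g, rfl, h.symm⟩
        cases j with
        | zero =>
          exfalso
          simp only [List.eraseIdx] at hok
          rw [pvFirstBad_some_notOk s (b :: rest) 0 f' hf'] at hok
          simp at hok
        | succ k =>
          have hok' : pvOk s ((b :: rest).eraseIdx k) = true := by
            simp only [List.eraseIdx] at hok
            exact pvOk_tail s a _ hok
          rcases ih f' k hf' hok' with rfl | rfl
          · left; rfl
          · right; rfl
      · simp only [Option.some.injEq] at h
        subst h
        match j with
        | 0 => exact Or.inl rfl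
        | 1 => exact Or.inr rfl
        | (k + 2) =>
          exfalso
          simp only [List.eraseIdx, pvOk, Bool.and_eq_true, decide_eq_true_eq] at hok
          exact hc hok.1

lemma pvDrop_eq (xs : List Int) (i : Nat) : pvDrop xs i = xs.eraseIdx i := by
  unfold pvDrop
  rw [PySem.List.slice_to_natCast]
  have hc : ((i : Int) + 1) = (((i + 1 : Nat) : Int)) := by push_cast; ring
  rw [hc, PySem.List.slice_from_natCast, List.eraseIdx_eq_take_drop_succ]

lemma pvTryDir_iff (line : List Int) (s : Int) :
    pvTryDir line s = true ↔
      (pvOk s line = true ∨ ∃ j, j < line.length ∧ pvOk s (line.eraseIdx j) = true) := by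
  unfold pvTryDir
  split_ifs with h
  · simp [h]
  · cases hfb : pvFirstBad s line 0 with
    | none => exact absurd (pvFirstBad_none s line 0 hfb) h
    | some f =>
      simp only [Bool.or_eq_true, pvDrop_eq]
      have hlen := pvFirstBad_lt s line 0 f hfb
      constructor
      · rintro (h1 | h1)
        · exact Or.inr ⟨f, by omega, h1⟩
        · exact Or.inr ⟨f + 1, by omega, h1⟩
      · rintro (h1 | ⟨j, hj, hok⟩)
        · exact absurd h1 h
        · rcases pvKey s line f j hfb hok with rfl | rfl
          · exact Or.inl hok
          · exact Or.inr hok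

-- ---- A-side loop characterisation ----
lemma pvDampLoop_eq (line : List Int) : ∀ (ns : List Nat), (∀ n ∈ ns, n < line.length) →
    pvDampLoop line ns =
      if ∃ n ∈ ns, pvIsSafe (line.eraseIdx n) = some 1 then 1 else 0 := by
  intro ns
  induction ns with
  | nil => intro _; simp [pvDampLoop]
  | cons n ns ih =>
    intro h
    have hn : n < line.length := h n (List.mem_cons_self ..)
    simp only [pvDampLoop]
    rw [PySem.List.pop?_natCast line n hn]
    show (if pvIsSafe (line.eraseIdx n) = some 1 then 1 else pvDampLoop line ns) =
      if ∃ m ∈ n :: ns, pvIsSafe (line.eraseIdx m) = some 1 then 1 else 0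
    by_cases hs : pvIsSafe (line.eraseIdx n) = some 1
    · rw [if_pos hs, if_pos ⟨n, List.mem_cons_self .., hs⟩]
    · rw [if_neg hs, ih (fun m hm => h m (List.mem_cons_of_mem _ hm))]
      by_cases he : ∃ m ∈ ns, pvIsSafe (line.eraseIdx m) = some 1
      · obtain ⟨m, hm, hsm⟩ := he
        rw [if_pos ⟨m, hm, hsm⟩, if_pos ⟨m, List.mem_cons_of_mem _ hm, hsm⟩]
      · rw [if_neg he, if_neg ?_]
        rintro ⟨m, hm, hsm⟩
        rcases List.mem_cons.mp hm with rfl | hm'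
        · exact hs hsm
        · exact he ⟨m, hm', hsm⟩

lemma A_char (line : List Int) :
    problem_dampener line =
      if pvIsSafe line = some 1 ∨ ∃ n, n < line.length ∧ pvIsSafe (line.eraseIdx n) = some 1
      then 1 else 0 := by
  unfold problem_dampener
  by_cases h : pvIsSafe line = some 1
  · rw [if_pos h, if_pos (Or.inl h)]
  · rw [if_neg h, pvDampLoop_eq line _ (fun m hm => List.mem_range.mp hm)]
    by_cases he : ∃ n, n < line.length ∧ pvIsSafe (line.eraseIdx n) = some 1
    · obtain ⟨n, hn, hs⟩ := he
      rw [if_pos ⟨n, List.mem_range.mpr hn, hs⟩, if_pos (Or.inr ⟨n, hn, hs⟩)]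
    · rw [if_neg ?_, if_neg ?_]
      · rintro (h1 | h1); exact h h1; exact he h1
      · rintro ⟨n, hn, hs⟩; exact he ⟨n, List.mem_range.mp hn, hs⟩

lemma pvGoodTwo_len (line : List Int) (h : pvGoodTwo line = true) : line.length = 2 := by
  unfold pvGoodTwo at h
  cases line with
  | nil => simp at h
  | cons a t =>
    cases t with
    | nil => simp at h
    | cons b rest =>
      cases rest with
      | nil => rfl
      | cons c r => simp at h


-- ===== VERDICT (by name: the statement is the Claim_ definition above) =====
theorem problem_dampener_spec : Claim_equal_problem_dampener := by
  intro line hDom hPre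
  unfold Spec_problem_dampener
  rcases hPre with h3 | h2
  · -- length ≥ 3: both sides are 'if <safe with ≤ 1 removal> then 1 else 0'
    rw [A_char]
    unfold problem_dampener_alt
    have h2' : 2 ≤ line.length := by omega
    have hE : ∀ n, n < line.length → 2 ≤ (line.eraseIdx n).length := by
      intro n hn
      rw [List.length_eraseIdx]
      split <;> omega
    have hiff : (pvIsSafe line = some 1 ∨
          ∃ n, n < line.length ∧ pvIsSafe (line.eraseIdx n) = some 1)
        ↔ ((pvTryDir line 1 || pvTryDir line (-1)) = true) := by
      rw [Bool.or_eq_true, pvTryDir_iff, pvTryDir_iff, pvIsSafe_iff line h2']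
      have hex : (∃ n, n < line.length ∧ pvIsSafe (line.eraseIdx n) = some 1)
          ↔ (∃ n, n < line.length ∧
              (pvOk 1 (line.eraseIdx n) = true ∨ pvOk (-1) (line.eraseIdx n) = true)) :=
        exists_congr fun n => and_congr_right fun hn => pvIsSafe_iff _ (hE n hn)
      rw [hex]
      constructor
      · rintro ((h | h) | ⟨n, hn, (h | h)⟩)
        · exact Or.inl (Or.inl h)
        · exact Or.inr (Or.inl h)
        · exact Or.inl (Or.inr ⟨n, hn, h⟩)
        · exact Or.inr (Or.inr ⟨n, hn, h⟩)
      · rintro ((h | ⟨n, hn, h⟩) | (h | ⟨n, hn, h⟩))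
        · exact Or.inl (Or.inl h)
        · exact Or.inr ⟨n, hn, Or.inl h⟩
        · exact Or.inl (Or.inr h)
        · exact Or.inr ⟨n, hn, Or.inr h⟩
    by_cases hb : (pvTryDir line 1 || pvTryDir line (-1)) = true
    · rw [if_pos (hiff.mpr hb), if_pos hb]
    · rw [if_neg (fun hc => hb (hiff.mp hc)), if_neg hb]
  · -- exactly two elements forming one safe step: both sides return 1 immediately
    obtain ⟨a, b, rfl⟩ : ∃ a b, line = [a, b] := by
      have hl := pvGoodTwo_len line h2
      obtain ⟨a, b, rest, rfl⟩ := exists_cons2 line (by omega)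
      cases rest with
      | nil => exact ⟨a, b, rfl⟩
      | cons c r => simp at hl
    simp only [pvGoodTwo, decide_eq_true_eq] at h2
    have hok : pvOk 1 [a, b] = true ∨ pvOk (-1) [a, b] = true := by
      rcases h2 with hg | hg
      · exact Or.inl (by simp only [pvOk, Bool.and_eq_true, decide_eq_true_eq]
                         exact ⟨by omega, trivial⟩)
      · exact Or.inr (by simp only [pvOk, Bool.and_eq_true, decide_eq_true_eq]
                         exact ⟨by omega, trivial⟩)
    have hsafe : pvIsSafe [a, b] = some 1 := (pvIsSafe_pair_iff a b []).mpr hok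
    unfold problem_dampener problem_dampener_alt
    rw [if_pos hsafe, if_pos ?_]
    simp only [Bool.or_eq_true]
    rcases hok with hk | hk
    · exact Or.inl (by unfold pvTryDir; rw [if_pos hk])
    · exact Or.inr (by unfold pvTryDir; rw [if_pos hk])
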